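-- pv_equiv track=rewrite | github.com/mixvlad/2025_05_24_Olymp_PT | E/solution.py | solution
-- ===== SOURCE A (Python) =====
-- def solution(n, m, used) -> str:
--     if m > n:
--         return ' '.join(['1'] * n + ['0'] * (m - n))
--     if m == n:
--         return ' '.join(['1'] * n)
--
--     prefix = [0] * (n + 1)
--     for i in range(n):
--         prefix[i + 1] = prefix[i] + used[i]
--
--     weighted_prefix = [0] * (n + 1)
--     for i in range(n):
--         weighted_prefix[i + 1] = weighted_prefix[i] + used[i] * (i + 1)
--
--     dp = [[float('inf')] * (m + 1) for _ in range(n + 1)]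
--     dp[0][0] = 0
--
--     for i in range(1, n + 1):
--         for j in range(1, min(i + 1, m + 1)):
--             for k in range(1, i + 1):
--                 start = i - k
--                 end = i
--                 segment_sum = (weighted_prefix[end] - weighted_prefix[start]) - start * (prefix[end] - prefix[start])
--                 dp[i][j] = min(dp[i][j], dp[i - k][j - 1] + segment_sum)
--
--     result = [0] * m
--     i, j = n, m
--     while j > 0:
--         for k in range(1, i + 1):
--             start = i - k
--             end = i
--             segment_sum = (weighted_prefix[end] - weighted_prefix[start]) - start * (prefix[end] - prefix[start])
--             if dp[i][j] == dp[i - k][j - 1] + segment_sum: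
--                 result[j - 1] = k
--                 i -= k
--                 j -= 1
--                 break
--
--     return ' '.join(map(str, result))
-- ===== SOURCE B (Python) =====
-- def solution(n, m, used) -> str:
--     if m >= n:
--         return ' '.join(['1'] * n + ['0'] * (m - n))
--
--     P = [0] * (n + 1)
--     W = [0] * (n + 1)
--     for i in range(n):
--         P[i + 1] = P[i] + used[i]
--         W[i + 1] = W[i] + used[i] * (i + 1)
--
--     # dp[i][j] = min over s of dp[s][j-1] + cost(s, i)  with cost(s, i) =
--     # (W[i]-W[s]) - s*(P[i]-P[s])  =  W[i] + eval of line (-s, dp[s][j-1]-W[s]+s*P[s]) at x = P[i].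
--     # Each layer is a minimum of lines: convex hull trick (slopes -s strictly decreasing,
--     # lower envelope, binary-search queries).  Only the band j <= i <= n-m+j is reachable
--     # from (n, m) with nonempty segments, so each layer sweeps just that band.
--     layers = [[0] + [None] * n]
--     for j in range(1, m + 1):
--         prev = layers[-1]
--         cur = [None] * (n + 1)
--         hull = []
--         for i in range(j, n - m + j + 1):
--             p = prev[i - 1]
--             if p is not None:
--                 s = i - 1
--                 line = (-s, p - W[s] + s * P[s])
--                 while len(hull) >= 2 and \
--                         (line[1] - hull[-1][1]) * (hull[-2][0] - hull[-1][0]) <= \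
--                         (hull[-1][1] - hull[-2][1]) * (hull[-1][0] - line[0]):
--                     hull.pop()
--                 hull.append(line)
--             if hull:
--                 x = P[i]
--                 lo = 0
--                 hi = len(hull) - 1
--                 while lo < hi:
--                     mid = (lo + hi) // 2
--                     if hull[mid][0] * x + hull[mid][1] <= hull[mid + 1][0] * x + hull[mid + 1][1]:
--                         hi = mid
--                     else:
--                         lo = mid + 1
--                 cur[i] = W[i] + hull[lo][0] * x + hull[lo][1]
--         layers.append(cur)
--
--     # reconstruction: first matching (smallest) segment length, right to left
--     res = []
--     i = n
--     for j in range(m, 0, -1):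
--         prev, cur = layers[j - 1], layers[j]
--         for k in range(1, i + 1):
--             s = i - k
--             ps = prev[s]
--             if ps is not None and cur[i] == ps + (W[i] - W[s]) - s * (P[i] - P[s]):
--                 res.append(k)
--                 i = s
--                 break
--     return ' '.join(str(k) for k in reversed(res))
-- ===== Notes on version B (the rewrite author's own statement) =====
-- stated objective: alternative
-- what changed: A fills dp[i][j] with a brute-force inner scan over all segment starts (triple loop); B rewrites the transition as a minimum of lines y = (dp[s][j-1]-W[s]+s*P[s]) - s*x queried at x = P[i], computes each layer with the convex hull trick (monotone-slope lower envelope, binary-search queries) over the reachable band j <= i <= n-m+j, and keeps A's value-based backward reconstruction.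
import Mathlib
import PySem

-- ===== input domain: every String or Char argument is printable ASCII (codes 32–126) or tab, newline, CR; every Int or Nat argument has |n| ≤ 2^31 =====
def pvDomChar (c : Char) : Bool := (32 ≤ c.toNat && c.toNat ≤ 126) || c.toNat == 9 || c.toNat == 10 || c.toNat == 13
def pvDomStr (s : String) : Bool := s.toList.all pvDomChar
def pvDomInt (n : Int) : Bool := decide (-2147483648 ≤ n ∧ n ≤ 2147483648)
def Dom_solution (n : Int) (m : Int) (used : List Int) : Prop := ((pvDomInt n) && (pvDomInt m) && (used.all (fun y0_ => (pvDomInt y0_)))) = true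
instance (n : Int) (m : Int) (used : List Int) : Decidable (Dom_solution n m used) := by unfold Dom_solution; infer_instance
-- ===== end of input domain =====

-- B replaces A's brute-force inner scan over segment starts (triple-loop dp) by
-- the convex hull trick: each dp layer is a minimum of lines evaluated at the
-- prefix sums, maintained as a monotone-slope lower envelope with binary-search
-- queries; reconstruction stays value-based. Same return value on all of Pre_.

-- ===== PORT A =====
-- prefix[i] fill loop of A, as the obvious structural recursion
def prefA (used : List Int) : Nat → Int
  | 0 => 0
  | i+1 => prefA used i + used.getD i 0

-- weighted_prefix[i] fill loop of A
def wprefA (used : List Int) : Nat → Int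
  | 0 => 0
  | i+1 => wprefA used i + used.getD i 0 * ((i : Int) + 1)

-- segment_sum of A, computed from the two prefix arrays
def segA (used : List Int) (s e : Nat) : Int :=
  (wprefA used e - wprefA used s) - (s : Int) * (prefA used e - prefA used s)

-- Python min with float('inf') as none (dp values are exact ints otherwise)
def minO : Option Int → Option Int → Option Int
  | none, b => b
  | some a, none => some a
  | some a, some b => some (min a b)

-- Python inf + int = inf
def addO : Option Int → Int → Option Int
  | none, _ => none
  | some a, c => some (a + c)

-- dp[i][j] read / write on the list-of-lists table
def getT (dp : List (List (Option Int))) (i j : Nat) : Option Int := (dp.getD i []).getD j none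
def setT (dp : List (List (Option Int))) (i j : Nat) (v : Option Int) : List (List (Option Int)) :=
  dp.set i ((dp.getD i []).set j v)

-- the dp table of A: '[[inf]*(m+1) for _ in range(n+1)]', 'dp[0][0] = 0', then the triple loop
def dpAL (used : List Int) (N M : Nat) : List (List (Option Int)) :=
  (List.range N).foldl (fun dp i0 =>
    (List.range (min (i0+1) M)).foldl (fun dp j0 =>
      (List.range (i0+1)).foldl (fun dp k0 =>
        setT dp (i0+1) (j0+1) (minO (getT dp (i0+1) (j0+1))
          (addO (getT dp (i0+1-(k0+1)) (j0+1-1)) (segA used (i0+1-(k0+1)) (i0+1))))) dp) dp)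
    (setT (List.replicate (N+1) (List.replicate (M+1) (none : Option Int))) 0 0 (some 0))

-- 'for k in range(1, i + 1): … if dp[i][j] == dp[i-k][j-1] + segment_sum: … break'
def findKA (used : List Int) (t : Nat → Nat → Option Int) (i j : Nat) : Option Nat :=
  ((List.range i).find? (fun k0 =>
    decide (t i j = addO (t (i - (k0+1)) (j-1)) (segA used (i - (k0+1)) i)))).map (· + 1)

-- the 'while j > 0' reconstruction; fuel j; on a failed scan Python loops
-- forever, the port returns the partial result (unreachable under Pre_)
def reconA (used : List Int) (t : Nat → Nat → Option Int) : Nat → Nat → List Int → List Int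
  | 0, _, res => res
  | j+1, i, res =>
    match findKA used t i (j+1) with
    | some k => reconA used t j (i - k) (res.set j (k : Int))
    | none => res

def solution (n : Int) (m : Int) (used : List Int) : String :=
  if m > n then
    PySem.Str.join " " (List.replicate n.toNat "1" ++ List.replicate (m - n).toNat "0")
  else if m = n then
    PySem.Str.join " " (List.replicate n.toNat "1")
  else
    let N := n.toNat
    let M := m.toNat
    let dp := dpAL used N M
    let res := reconA used (getT dp) M N (List.replicate M 0)
    PySem.Str.join " " (res.map PySem.Int.toStr)

-- ===== PORT B =====
-- a line y = a*x + b as (a, b)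
def evalLine (l : Int × Int) (x : Int) : Int := l.1 * x + l.2

-- bad(l1, l2, l3) of Source B: l2 never strictly below both neighbours
def badLine (l1 l2 l3 : Int × Int) : Bool :=
  decide ((l3.2 - l2.2) * (l1.1 - l2.1) ≤ (l2.2 - l1.2) * (l2.1 - l3.1))

-- 'while len(hull) >= 2 and bad(hull[-2], hull[-1], line): hull.pop(); hull.append(line)'
def insLine (hull : List (Int × Int)) (l : Int × Int) : List (Int × Int) :=
  if _h : 2 ≤ hull.length ∧
      badLine (hull.getD (hull.length - 2) (0, 0)) (hull.getD (hull.length - 1) (0, 0)) l = true then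
    insLine hull.dropLast l
  else hull ++ [l]
termination_by hull.length
decreasing_by simp only [List.length_dropLast]; omega

-- the binary-search query of Source B
def queryBS (hull : List (Int × Int)) (x : Int) (lo hi : Nat) : Int :=
  if h : lo < hi then
    let mid := (lo + hi) / 2
    if evalLine (hull.getD mid (0, 0)) x ≤ evalLine (hull.getD (mid + 1) (0, 0)) x then
      queryBS hull x lo mid
    else
      queryBS hull x (mid + 1) hi
  else evalLine (hull.getD lo (0, 0)) x
termination_by hi - lo
decreasing_by all_goals omega

-- the line contributed by start s with dp value p: slope -s, intercept p - W[s] + s*P[s]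
def lineOf (used : List Int) (s : Nat) (p : Int) : Int × Int :=
  (-(s : Int), p - wprefA used s + (s : Int) * prefA used s)

-- one dp layer of Source B: sweep the reachable band i = jj .. n-m+jj,
-- inserting line s = i-1 and querying at P[i]
def layerB (used : List Int) (N M jj : Nat) (prev : List (Option Int)) : List (Option Int) :=
  ((List.range' jj (N - M + 1)).foldl
    (fun (st : List (Int × Int) × List (Option Int)) i =>
      let hull := match prev.getD (i - 1) none with
        | none => st.1
        | some p => insLine st.1 (lineOf used (i - 1) p)
      let cur := if hull.isEmpty then st.2
        else st.2.set i (some (wprefA used i + queryBS hull (prefA used i) 0 (hull.length - 1)))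
      (hull, cur))
    ([], List.replicate (N + 1) (none : Option Int))).2

-- 'layers.append(...)' loop body of Source B (j0 + 1 is the layer index j)
def stepB2 (used : List Int) (N M : Nat)
    (st : List (Option Int) × List (List (Option Int))) (j0 : Nat) :
    List (Option Int) × List (List (Option Int)) :=
  let row := layerB used N M (j0 + 1) st.1
  (row, st.2 ++ [row])

-- 'layers = [[0] + [None]*n]; for j in range(1, m+1): ...'
def buildB2 (used : List Int) (N M : Nat) : List (List (Option Int)) :=
  ((List.range M).foldl (stepB2 used N M)
    (some 0 :: List.replicate N none, [some 0 :: List.replicate N none])).2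

-- 'for k in range(1, i+1): s = i-k; if prev[s] is not None and cur[i] == prev[s] + cost(s, i): ...'
def findKB (used : List Int) (prevL curL : List (Option Int)) (i : Nat) : Option Nat :=
  ((List.range i).find? (fun k0 =>
    match prevL.getD (i - (k0 + 1)) none with
    | none => false
    | some p => decide (curL.getD i none = some (p + segA used (i - (k0 + 1)) i)))).map (· + 1)

-- 'for j in range(m, 0, -1)' of Source B, appending segment lengths back-to-front
def reconB2 (used : List Int) (layers : List (List (Option Int))) : Nat → Nat → List Int → List Int
  | 0, _, res => res
  | j+1, i, res =>
    match findKB used (layers.getD j []) (layers.getD (j+1) []) i with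
    | some k => reconB2 used layers j (i - k) (res ++ [(k : Int)])
    | none => res

def solution_alt (n : Int) (m : Int) (used : List Int) : String :=
  if m ≥ n then
    PySem.Str.join " " (List.replicate n.toNat "1" ++ List.replicate (m - n).toNat "0")
  else
    let N := n.toNat
    let M := m.toNat
    let layers := buildB2 used N M
    let parts := reconB2 used layers M N []
    PySem.Str.join " " (parts.reverse.map PySem.Int.toStr)

-- ===== PRECONDITION & SPEC =====
-- Pre_ excludes exactly the inputs on which A raises (IndexError): m < n with
-- m < 0, or m < n with fewer than n elements in used.
def Pre_solution (n : Int) (m : Int) (used : List Int) : Prop :=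
  n ≤ m ∨ (0 ≤ m ∧ n ≤ (used.length : Int))
instance (n : Int) (m : Int) (used : List Int) : Decidable (Pre_solution n m used) := by
  unfold Pre_solution; infer_instance

def pvWitness_solution : Int × Int × List Int := (4, 2, [1, 0, 1, 1])

def Spec_solution (n : Int) (m : Int) (used : List Int) (out : String) : Prop :=
  out = solution_alt n m used
instance (n : Int) (m : Int) (used : List Int) (out : String) : Decidable (Spec_solution n m used out) := by
  unfold Spec_solution; infer_instance

-- ===== CLAIM (what is proved, stated in full; the proofs are below) =====
def Claim_equal_solution : Prop := ∀ (n : Int) (m : Int) (used : List Int),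
  Dom_solution n m used → Pre_solution n m used → Spec_solution n m used (solution n m used)

-- ===== LEMMAS AND PROOFS =====


-- ---------- A side: function-table mirror of A's dp loop ----------
def tupd (t : Nat → Nat → Option Int) (i j : Nat) (v : Option Int) : Nat → Nat → Option Int :=
  fun i' j' => if i' = i ∧ j' = j then v else t i' j'

def innerK (used : List Int) (i j : Nat) (t : Nat → Nat → Option Int) : Nat → Nat → Option Int :=
  (List.range i).foldl
    (fun t k0 =>
      tupd t i j (minO (t i j) (addO (t (i - (k0+1)) (j-1)) (segA used (i - (k0+1)) i)))) t

def innerJ (used : List Int) (M i : Nat) (t : Nat → Nat → Option Int) : Nat → Nat → Option Int :=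
  (List.range (min i M)).foldl (fun t j0 => innerK used i (j0+1) t) t

def dpA (used : List Int) (N M : Nat) : Nat → Nat → Option Int :=
  (List.range N).foldl (fun t i0 => innerJ used M (i0+1) t)
    (fun i j => if i = 0 ∧ j = 0 then some 0 else none)

theorem minO_none_right (a : Option Int) : minO a none = a := by cases a <;> rfl

-- canonical layered dp value: L j i = dp[i][j] of A (for j ≤ m)
def L (used : List Int) : Nat → Nat → Option Int
  | 0, i => if i = 0 then some 0 else none
  | j+1, i =>
    (List.range i).foldl
      (fun best k0 => minO best (addO (L used j (i - (k0+1))) (segA used (i - (k0+1)) i)))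
      none

-- descending-first-match chooser shared by both reconstructions
def chooseS (used : List Int) (j i : Nat) : Option Nat :=
  (List.range i).reverse.find? (fun s =>
    decide (L used (j+1) i = addO (L used j s) (segA used s i)))

-- the sequence of segment lengths the reconstruction produces
def pathL (used : List Int) : Nat → Nat → List Int
  | 0, _ => []
  | j+1, i =>
    match chooseS used j i with
    | some s => ((i - s : Nat) : Int) :: pathL used j s
    | none => []

theorem L_none (used : List Int) : ∀ j i, i < j → L used j i = none := by
  intro j
  induction j with
  | zero => intro i h; omega
  | succ j ih =>
    intro i h
    show (List.range i).foldl _ none = none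
    have hall : ∀ b, b = none → ∀ (l : List Nat), (∀ k0 ∈ l, k0 < i) →
        l.foldl (fun best k0 => minO best (addO (L used j (i - (k0+1))) (segA used (i - (k0+1)) i))) b = none := by
      intro b hb l
      induction l generalizing b with
      | nil => intro _; exact hb
      | cons a tl ihl =>
        intro hmem
        have ha : i - (a+1) < j := by
          have := hmem a (by simp)
          omega
        simp only [List.foldl_cons]
        exact ihl _ (by rw [ih _ ha, hb]; rfl) (fun x hx => hmem x (by simp [hx]))
    exact hall none rfl _ (by intro k0 hk; exact List.mem_range.mp hk)

theorem L_le (used : List Int) (j i : Nat) (h : L used j i ≠ none) : j ≤ i := by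
  by_contra hc
  exact h (L_none used j i (by omega))

-- a min-fold is attained: if it is some v, some element equals some v
theorem foldl_minO_mem (f : Nat → Option Int) :
    ∀ (l : List Nat) (b : Option Int) (v : Int),
      l.foldl (fun best k0 => minO best (f k0)) b = some v →
      b = some v ∨ ∃ k0 ∈ l, f k0 = some v := by
  intro l
  induction l with
  | nil => intro b v h; exact Or.inl h
  | cons a tl ih =>
    intro b v h
    simp only [List.foldl_cons] at h
    rcases ih _ _ h with h' | ⟨k0, hk, hf⟩
    · -- minO b (f a) = some v
      cases b with
      | none =>
        cases hfa : f a with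
        | none => rw [hfa] at h'; simp [minO] at h'
        | some x =>
          rw [hfa] at h'
          right
          exact ⟨a, by simp, by rw [hfa]; exact h'⟩
      | some x =>
        cases hfa : f a with
        | none => rw [hfa] at h'; left; exact h'
        | some y =>
          rw [hfa] at h'
          have hv : min x y = v := by
            simpa [minO] using h'
          rcases min_cases x y with ⟨he, _⟩ | ⟨he, _⟩
          · left; rw [← hv, he]
          · right; exact ⟨a, by simp, by rw [hfa, ← hv, he]⟩
    · exact Or.inr ⟨k0, by simp [hk], hf⟩

theorem L_isSome (used : List Int) : ∀ j i, j ≤ i → (j = 0 → i = 0) → L used j i ≠ none := by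
  intro j
  induction j with
  | zero => intro i _ h0; rw [h0 rfl]; simp [L]
  | succ j ih =>
    intro i hji _
    have hs : L used j j ≠ none := ih j (le_refl j) (fun h0 => h0)
    show (List.range i).foldl _ none ≠ none
    have key : ∀ (l : List Nat) (b : Option Int),
        (b ≠ none ∨ ∃ k0 ∈ l, addO (L used j (i - (k0+1))) (segA used (i - (k0+1)) i) ≠ none) →
        l.foldl (fun best k0 => minO best (addO (L used j (i - (k0+1))) (segA used (i - (k0+1)) i))) b ≠ none := by
      intro l
      induction l with
      | nil => intro b hb; rcases hb with h | ⟨_, h, _⟩; exact h; cases h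
      | cons a tl ihl =>
        intro b hb
        simp only [List.foldl_cons]
        rcases hb with h | ⟨k0, hk, hne⟩
        · apply ihl; left
          cases hba : b with
          | none => exact absurd hba h
          | some x => cases hfa : addO (L used j (i - (a+1))) (segA used (i - (a+1)) i) <;> simp [minO]
        · rcases List.mem_cons.mp hk with rfl | hk'
          · apply ihl; left
            cases hfa : addO (L used j (i - (k0+1))) (segA used (i - (k0+1)) i) with
            | none => exact absurd hfa hne
            | some x => cases b <;> simp [minO]
          · apply ihl; right; exact ⟨k0, hk', hne⟩
    apply key
    right
    refine ⟨i - j - 1, List.mem_range.mpr (by omega), ?_⟩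
    have : i - (i - j - 1 + 1) = j := by omega
    rw [this]
    cases hLs : L used j j with
    | none => exact absurd hLs hs
    | some p => simp [addO]

-- ---------- A side: the triple loop computes L ----------

theorem innerK_spec (used : List Int) (i j : Nat) (hi : 1 ≤ i) :
    ∀ (l : List Nat) (t : Nat → Nat → Option Int),
      (∀ s, s < i → t s j = L used j s) →
      ∀ i' j',
        (l.foldl (fun t k0 =>
          tupd t i (j+1) (minO (t i (j+1)) (addO (t (i - (k0+1)) j) (segA used (i - (k0+1)) i)))) t) i' j'
        = if i' = i ∧ j' = j+1 then
            l.foldl (fun b k0 => minO b (addO (L used j (i - (k0+1))) (segA used (i - (k0+1)) i))) (t i (j+1))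
          else t i' j' := by
  intro l
  induction l with
  | nil =>
    intro t _ i' j'
    simp only [List.foldl_nil]
    by_cases h : i' = i ∧ j' = j+1
    · rw [if_pos h, h.1, h.2]
    · rw [if_neg h]
  | cons a tl ih =>
    intro t hread i' j'
    simp only [List.foldl_cons]
    have hs : i - (a+1) < i := by omega
    have hread' : t (i - (a+1)) j = L used j (i - (a+1)) := hread _ hs
    set t' := tupd t i (j+1) (minO (t i (j+1)) (addO (t (i - (a+1)) j) (segA used (i - (a+1)) i))) with ht'
    have hread'' : ∀ s, s < i → t' s j = L used j s := by
      intro s hsi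
      rw [ht']
      show (if s = i ∧ j = j+1 then _ else t s j) = _
      rw [if_neg (by omega)]
      exact hread s hsi
    rw [ih t' hread'']
    by_cases hcase : i' = i ∧ j' = j + 1
    · rw [if_pos hcase, if_pos hcase]
      have : t' i (j+1) = minO (t i (j+1)) (addO (L used j (i - (a+1))) (segA used (i - (a+1)) i)) := by
        rw [ht']; show (if i = i ∧ j+1 = j+1 then _ else _) = _
        rw [if_pos ⟨rfl, rfl⟩, hread']
      rw [this]
    · rw [if_neg hcase, if_neg hcase, ht']
      show (if i' = i ∧ j' = j+1 then _ else t i' j') = t i' j'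
      rw [if_neg hcase]

-- table description after processing rows 1..x
def tblInv (used : List Int) (M : Nat) (x : Nat) (t : Nat → Nat → Option Int) : Prop :=
  ∀ i j, t i j = if i ≤ x ∧ 1 ≤ j ∧ j ≤ M then L used j i
                 else if i = 0 ∧ j = 0 then some 0 else none

theorem tblInv_read (used : List Int) (M x : Nat) (t : Nat → Nat → Option Int)
    (h : tblInv used M x t) (s j : Nat) (hs : s ≤ x) (hj : j ≤ M) : t s j = L used j s := by
  rw [h s j]
  by_cases h1 : 1 ≤ j
  · rw [if_pos ⟨hs, h1, hj⟩]
  · have hj0 : j = 0 := by omega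
    subst hj0
    rw [if_neg (by omega)]
    by_cases hs0 : s = 0
    · subst hs0; simp [L]
    · rw [if_neg (by simp [hs0]), L]
      rw [if_neg hs0]

theorem innerJ_spec (used : List Int) (M i : Nat) (hi : 1 ≤ i)
    (t : Nat → Nat → Option Int) (ht : tblInv used M (i-1) t) :
    tblInv used M i (innerJ used M i t) := by
  unfold innerJ
  suffices h : ∀ (c a : Nat), a + c = min i M →
      ∀ t, (∀ i' j', t i' j' = if i' = i ∧ 1 ≤ j' ∧ j' ≤ a then L used j' i'
                               else if i' ≤ i-1 ∧ 1 ≤ j' ∧ j' ≤ M then L used j' i'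
                               else if i' = 0 ∧ j' = 0 then some 0 else none) →
      ∀ i' j', ((List.range' a c).foldl (fun t j0 => innerK used i (j0+1) t) t) i' j'
        = if i' = i ∧ 1 ≤ j' ∧ j' ≤ min i M then L used j' i'
          else if i' ≤ i-1 ∧ 1 ≤ j' ∧ j' ≤ M then L used j' i'
          else if i' = 0 ∧ j' = 0 then some 0 else none by
    intro i' j'
    rw [show List.range (min i M) = List.range' 0 (min i M) by rw [List.range_eq_range']]
    rw [h (min i M) 0 (by omega) t ?inv i' j']
    · by_cases hc : i' = i ∧ 1 ≤ j' ∧ j' ≤ min i M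
      · rw [if_pos hc, if_pos ⟨by omega, hc.2.1, le_trans hc.2.2 (min_le_right _ _)⟩]
      · by_cases hc2 : i' ≤ i-1 ∧ 1 ≤ j' ∧ j' ≤ M
        · rw [if_neg hc, if_pos hc2, if_pos ⟨by omega, hc2.2⟩]
        · rw [if_neg hc, if_neg hc2]
          by_cases hc3 : i' ≤ i ∧ 1 ≤ j' ∧ j' ≤ M
          · have hii : i' = i := by omega
            have hjj : i < j' := by omega
            rw [if_pos hc3, hii, L_none used j' i hjj, if_neg (by omega)]
          · rw [if_neg hc3]
    case inv =>
      intro i' j'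
      rw [ht i' j']
      by_cases hc : i' = i ∧ 1 ≤ j' ∧ j' ≤ 0
      · omega
      · rw [if_neg hc]
  intro c
  induction c with
  | zero =>
    intro a ha t ht' i' j'
    simp only [List.range'_zero, List.foldl_nil]
    rw [ht' i' j']
    by_cases hc : i' = i ∧ 1 ≤ j' ∧ j' ≤ a
    · rw [if_pos hc, if_pos ⟨hc.1, hc.2.1, by omega⟩]
    · rw [if_neg hc]
      by_cases hc2 : i' = i ∧ 1 ≤ j' ∧ j' ≤ min i M
      · omega
      · rw [if_neg hc2]
  | succ c ihc =>
    intro a ha t ht' i' j'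
    have hrange : List.range' a (c+1) = a :: List.range' (a+1) c := by
      simp [List.range'_succ]
    rw [hrange]
    simp only [List.foldl_cons]
    have hread : ∀ s, s < i → t s a = L used a s := by
      intro s hsi
      rw [ht' s a]
      rw [if_neg (by omega)]
      by_cases h1 : 1 ≤ a
      · rw [if_pos ⟨by omega, h1, by omega⟩]
      · have ha0 : a = 0 := by omega
        subst ha0
        rw [if_neg (by omega)]
        by_cases hs0 : s = 0
        · subst hs0; simp [L]
        · rw [if_neg (by simp [hs0]), L, if_neg hs0]
    have hstep := innerK_spec used i a hi (List.range i) t hread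
    have hcur : t i (a+1) = none := by
      rw [ht' i (a+1), if_neg (by omega), if_neg (by omega), if_neg (by omega)]
    apply ihc (a+1) (by omega)
    intro i'' j''
    unfold innerK
    simp only [Nat.add_sub_cancel]
    rw [hstep i'' j'']
    by_cases hc : i'' = i ∧ j'' = a+1
    · rw [if_pos hc, if_pos (by omega), hc.1, hc.2, hcur]
      show _ = L used (a+1) i
      rw [L]
    · rw [if_neg hc, ht' i'' j'']
      by_cases hc2 : i'' = i ∧ 1 ≤ j'' ∧ j'' ≤ a
      · rw [if_pos hc2, if_pos (show i'' = i ∧ 1 ≤ j'' ∧ j'' ≤ a+1 by omega)]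
      · rw [if_neg hc2, if_neg (show ¬(i'' = i ∧ 1 ≤ j'' ∧ j'' ≤ a+1) by omega)]

theorem dpA_spec (used : List Int) (N M : Nat) : tblInv used M N (dpA used N M) := by
  unfold dpA
  suffices h : ∀ (c a : Nat), a + c = N →
      ∀ t, tblInv used M a t →
      tblInv used M (a + c) ((List.range' a c).foldl (fun t i0 => innerJ used M (i0+1) t) t) by
    rw [show List.range N = List.range' 0 N by rw [List.range_eq_range']]
    have hbase : tblInv used M 0 (fun i j => if i = 0 ∧ j = 0 then some 0 else none) := by
      intro i j
      by_cases hc : i ≤ 0 ∧ 1 ≤ j ∧ j ≤ M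
      · rw [if_pos hc]
        have hi0 : i = 0 := by omega
        subst hi0
        rw [L_none used j 0 (by omega)]
        show (if (0:Nat) = 0 ∧ j = 0 then (some 0 : Option Int) else none) = none
        rw [if_neg (by omega)]
      · rw [if_neg hc]
    have := h N 0 (by omega) _ hbase
    simpa using this
  intro c
  induction c with
  | zero => intro a _ t ht; simpa using ht
  | succ c ihc =>
    intro a ha t ht
    have hrange : List.range' a (c+1) = a :: List.range' (a+1) c := by
      simp [List.range'_succ]
    rw [hrange]
    simp only [List.foldl_cons]
    have hstep : tblInv used M (a+1) (innerJ used M (a+1) t) := by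
      apply innerJ_spec used M (a+1) (by omega)
      simpa using ht
    have := ihc (a+1) (by omega) _ hstep
    have heq : a + (c+1) = (a+1) + c := by omega
    rw [heq]
    exact this

-- ---------- reconstruction: shared chooser ----------

theorem find?_congr_pv {α : Type} (l : List α) (p q : α → Bool) (h : ∀ x ∈ l, p x = q x) :
    l.find? p = l.find? q := by
  induction l with
  | nil => rfl
  | cons a tl ih =>
    simp only [List.find?_cons]
    rw [h a (by simp)]
    cases q a
    · exact ih (fun x hx => h x (by simp [hx]))
    · rfl

theorem map_sub_range (i : Nat) :
    (List.range i).map (fun k0 => i - 1 - k0) = (List.range i).reverse := by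
  apply List.ext_getElem
  · simp
  · intro k h1 h2
    simp [List.getElem_reverse]

theorem chooseS_spec (used : List Int) (j i : Nat) (v : Int) (hv : L used (j+1) i = some v) :
    ∃ s, chooseS used j i = some s ∧ s < i ∧
      L used (j+1) i = addO (L used j s) (segA used s i) ∧ L used j s ≠ none ∧ j ≤ s := by
  have h1 : L used (j+1) i = (List.range i).foldl
      (fun best k0 => minO best (addO (L used j (i - (k0+1))) (segA used (i - (k0+1)) i))) none := by
    rw [L]
  have hmem : ∃ k0 ∈ List.range i,
      addO (L used j (i - (k0+1))) (segA used (i - (k0+1)) i) = some v := by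
    rcases foldl_minO_mem _ (List.range i) none v (by rw [← h1]; exact hv) with h | h
    · cases h
    · exact h
  obtain ⟨k0, hk0, hck⟩ := hmem
  have hk0i : k0 < i := List.mem_range.mp hk0
  have hs0 : i - (k0+1) ∈ (List.range i).reverse := by
    simp only [List.mem_reverse, List.mem_range]
    omega
  have hpred : (fun s => decide (L used (j+1) i = addO (L used j s) (segA used s i))) (i - (k0+1)) = true := by
    simp only [decide_eq_true_eq]
    rw [hv, hck]
  have hfind : ((List.range i).reverse.find? (fun s =>
      decide (L used (j+1) i = addO (L used j s) (segA used s i)))).isSome := by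
    rw [List.find?_isSome]
    exact ⟨_, hs0, hpred⟩
  obtain ⟨s, hsfind⟩ := Option.isSome_iff_exists.mp hfind
  have hsi : s < i := by
    have := List.mem_of_find?_eq_some hsfind
    simpa [List.mem_reverse, List.mem_range] using this
  have hp : L used (j+1) i = addO (L used j s) (segA used s i) := by
    have := List.find?_some hsfind
    simpa using this
  have hns : L used j s ≠ none := by
    intro hnone
    rw [hnone] at hp
    rw [hv] at hp
    simp [addO] at hp
  exact ⟨s, hsfind, hsi, hp, hns, L_le used j s hns⟩

theorem findKA_eq (used : List Int) (t : Nat → Nat → Option Int) (N M i j : Nat)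
    (hT : ∀ i' j', i' ≤ N → j' ≤ M → t i' j' = L used j' i') (hiN : i ≤ N) (hjM : j+1 ≤ M) :
    findKA used t i (j+1) = (chooseS used j i).map (fun s => i - s) := by
  unfold findKA chooseS
  simp only [Nat.add_sub_cancel]
  have hc : (List.range i).find? (fun k0 =>
        decide (t i (j+1) = addO (t (i-(k0+1)) j) (segA used (i-(k0+1)) i)))
      = (List.range i).find? ((fun s =>
        decide (L used (j+1) i = addO (L used j s) (segA used s i))) ∘ (fun k0 => i - 1 - k0)) := by
    apply find?_congr_pv
    intro k0 hk0
    have hk : k0 < i := List.mem_range.mp hk0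
    rw [hT i (j+1) hiN hjM, hT (i-(k0+1)) j (by omega) (by omega)]
    have he : i - (k0+1) = i - 1 - k0 := by omega
    rw [he]
    rfl
  cases hfind : (List.range i).find? ((fun s =>
      decide (L used (j+1) i = addO (L used j s) (segA used s i))) ∘ (fun k0 => i - 1 - k0)) with
  | none =>
    rw [hc, hfind]
    have : (List.range i).reverse.find? (fun s =>
        decide (L used (j+1) i = addO (L used j s) (segA used s i))) = none := by
      rw [← map_sub_range, List.find?_map, hfind]
      rfl
    rw [this]
    rfl
  | some k0 =>
    have hk : k0 < i := List.mem_range.mp (List.mem_of_find?_eq_some hfind)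
    have h2 : (List.range i).reverse.find? (fun s =>
        decide (L used (j+1) i = addO (L used j s) (segA used s i))) = some (i - 1 - k0) := by
      rw [← map_sub_range, List.find?_map, hfind]
      rfl
    rw [hc, hfind, h2]
    simp only [Option.map_some]
    congr 1
    omega

theorem drop_set_pv (l : List Int) : ∀ (j : Nat) (a : Int), j < l.length →
    (l.set j a).drop j = a :: l.drop (j+1) := by
  induction l with
  | nil => intro j a h; simp at h
  | cons x tl ih =>
    intro j a h
    cases j with
    | zero => simp
    | succ j' =>
      simp only [List.set_cons_succ, List.drop_succ_cons]
      exact ih j' a (by simpa using h)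

-- ---------- bridges: A's list table computes the function table ----------

theorem foldl_sim {α β : Type} (R : α → β → Prop) (f : α → Nat → α) (g : β → Nat → β) :
    ∀ (l : List Nat) (a : α) (b : β), R a b →
      (∀ a b x, x ∈ l → R a b → R (f a x) (g b x)) → R (l.foldl f a) (l.foldl g b) := by
  intro l
  induction l with
  | nil => intro a b h _; exact h
  | cons x tl ih =>
    intro a b h hstep
    exact ih _ _ (hstep a b x (by simp) h) (fun a b y hy => hstep a b y (by simp [hy]))

def WFt (N M : Nat) (dp : List (List (Option Int))) : Prop :=
  dp.length = N+1 ∧ ∀ r ∈ dp, r.length = M+1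

theorem setT_pres (N M : Nat) (dp : List (List (Option Int))) (i j : Nat) (v : Option Int)
    (hwf : WFt N M dp) (hi : i ≤ N) (hj : j ≤ M) :
    WFt N M (setT dp i j v) ∧
    ∀ i' j', getT (setT dp i j v) i' j' = if i' = i ∧ j' = j then v else getT dp i' j' := by
  obtain ⟨hlen, hrows⟩ := hwf
  have hiL : i < dp.length := by omega
  have hget : dp.getD i [] = dp[i] := by
    rw [List.getD_eq_getElem?_getD, List.getElem?_eq_getElem hiL]
    rfl
  have hrlen : (dp.getD i []).length = M+1 := by
    rw [hget]
    exact hrows _ (List.getElem_mem hiL)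
  constructor
  · constructor
    · simp [setT, hlen]
    · intro r hr
      rcases List.mem_or_eq_of_mem_set hr with h | h
      · exact hrows r h
      · rw [h, List.length_set]
        exact hrlen
  · intro i' j'
    unfold setT getT
    by_cases hii : i' = i
    · subst hii
      have hset : (dp.set i' ((dp.getD i' []).set j v)).getD i' [] = (dp.getD i' []).set j v := by
        rw [List.getD_eq_getElem?_getD, List.getElem?_set_self]
        · rfl
        · exact hiL
      rw [hset]
      by_cases hjj : j' = j
      · subst hjj
        rw [if_pos ⟨rfl, rfl⟩]
        rw [List.getD_eq_getElem?_getD, List.getElem?_set_self]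
        · rfl
        · rw [hrlen]
          omega
      · rw [if_neg (by tauto)]
        rw [List.getD_eq_getElem?_getD, List.getElem?_set_ne (by omega), ← List.getD_eq_getElem?_getD]
    · rw [if_neg (by tauto)]
      have : (dp.set i ((dp.getD i []).set j v)).getD i' [] = dp.getD i' [] := by
        rw [List.getD_eq_getElem?_getD, List.getElem?_set_ne (by omega), ← List.getD_eq_getElem?_getD]
      rw [this]

theorem getT_replicate (N M i j : Nat) :
    getT (List.replicate (N+1) (List.replicate (M+1) (none : Option Int))) i j = none := by
  unfold getT
  simp [List.getD_eq_getElem?_getD, List.getElem?_replicate]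
  split_ifs <;> simp

theorem dpAL_eq (used : List Int) (N M : Nat) :
    ∀ i j, getT (dpAL used N M) i j = dpA used N M i j := by
  have hwfrep : WFt N M (List.replicate (N+1) (List.replicate (M+1) (none : Option Int))) := by
    constructor
    · simp
    · intro r hr
      rw [List.eq_of_mem_replicate hr]
      simp
  have hinit := setT_pres N M _ 0 0 (some 0) hwfrep (by omega) (by omega)
  have main : (fun (dp : List (List (Option Int))) (t : Nat → Nat → Option Int) => WFt N M dp ∧ ∀ i j, getT dp i j = t i j)
      (dpAL used N M) (dpA used N M) := by
    unfold dpAL dpA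
    refine foldl_sim (fun (dp : List (List (Option Int))) (t : Nat → Nat → Option Int) => WFt N M dp ∧ ∀ i j, getT dp i j = t i j) _ _ _ _ _ ?_ ?_
    · constructor
      · exact hinit.1
      · intro i j
        rw [hinit.2 i j, getT_replicate]
    · intro dp t i0 hi0 hR
      have hi : i0 + 1 ≤ N := by
        have := List.mem_range.mp hi0
        omega
      show (fun (dp : List (List (Option Int))) (t : Nat → Nat → Option Int) => WFt N M dp ∧ ∀ i j, getT dp i j = t i j)
        ((List.range (min (i0+1) M)).foldl (fun dp j0 =>
          (List.range (i0+1)).foldl (fun dp k0 =>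
            setT dp (i0+1) (j0+1) (minO (getT dp (i0+1) (j0+1))
              (addO (getT dp (i0+1-(k0+1)) (j0+1-1)) (segA used (i0+1-(k0+1)) (i0+1))))) dp) dp)
        ((List.range (min (i0+1) M)).foldl (fun t j0 => innerK used (i0+1) (j0+1) t) t)
      refine foldl_sim (fun (dp : List (List (Option Int))) (t : Nat → Nat → Option Int) => WFt N M dp ∧ ∀ i j, getT dp i j = t i j) _ _ _ _ _ ?_ ?_
      · exact hR
      · intro dp t j0 hj0 hR2
        have hj : j0 + 1 ≤ M := by
          have := List.mem_range.mp hj0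
          omega
        show (fun (dp : List (List (Option Int))) (t : Nat → Nat → Option Int) => WFt N M dp ∧ ∀ i j, getT dp i j = t i j)
          ((List.range (i0+1)).foldl (fun dp k0 =>
            setT dp (i0+1) (j0+1) (minO (getT dp (i0+1) (j0+1))
              (addO (getT dp (i0+1-(k0+1)) (j0+1-1)) (segA used (i0+1-(k0+1)) (i0+1))))) dp)
          ((List.range (i0+1)).foldl (fun t k0 =>
            tupd t (i0+1) (j0+1) (minO (t (i0+1) (j0+1))
              (addO (t (i0+1-(k0+1)) ((j0+1)-1)) (segA used (i0+1-(k0+1)) (i0+1))))) t)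
        refine foldl_sim (fun (dp : List (List (Option Int))) (t : Nat → Nat → Option Int) => WFt N M dp ∧ ∀ i j, getT dp i j = t i j) _ _ _ _ _ ?_ ?_
        · exact hR2
        · intro dp t k0 _ hR3
          obtain ⟨hwf, habs⟩ := hR3
          have hps := setT_pres N M dp (i0+1) (j0+1)
            (minO (getT dp (i0+1) (j0+1))
              (addO (getT dp (i0+1-(k0+1)) (j0+1-1)) (segA used (i0+1-(k0+1)) (i0+1))))
            hwf hi hj
          refine ⟨hps.1, ?_⟩
          intro i j
          rw [hps.2 i j]
          unfold tupd
          rw [habs, habs, habs]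
  exact main.2

theorem reconA_spec (used : List Int) (N M : Nat) (t : Nat → Nat → Option Int)
    (hT : ∀ i' j', i' ≤ N → j' ≤ M → t i' j' = L used j' i') :
    ∀ j i res, j ≤ i → i ≤ N → j ≤ M → (1 ≤ j → L used j i ≠ none) → res.length = M →
      reconA used t j i res = (pathL used j i).reverse ++ res.drop j := by
  intro j
  induction j with
  | zero => intro i res _ _ _ _ _; simp [reconA, pathL]
  | succ j ih =>
    intro i res hji hiN hjM hfin hlen
    obtain ⟨v, hv⟩ := Option.ne_none_iff_exists'.mp (hfin (by omega))
    obtain ⟨s, hcs, hsi, hLeq, hLs, hjs⟩ := chooseS_spec used j i v hv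
    rw [reconA, findKA_eq used t N M i j hT hiN hjM, hcs]
    simp only [Option.map_some]
    show reconA used t j (i - (i - s)) (res.set j ((i - s : Nat) : Int)) = _
    have hii : i - (i - s) = s := by omega
    rw [hii]
    rw [ih s _ (by omega) (by omega) (by omega) (fun _ => hLs) (by simp [hlen])]
    rw [pathL, hcs]
    rw [drop_set_pv res j _ (by omega)]
    simp

-- ---------- B side: min-option algebra ----------

theorem minO_comm (a b : Option Int) : minO a b = minO b a := by
  cases a <;> cases b <;> simp [minO, min_comm]

theorem minO_assoc (a b c : Option Int) : minO (minO a b) c = minO a (minO b c) := by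
  cases a <;> cases b <;> cases c <;> simp [minO, min_assoc]

-- minimum of the evaluations of a list of lines, as an Option
def mEv (H : List (Int × Int)) (x : Int) : Option Int :=
  H.foldr (fun l acc => minO (some (evalLine l x)) acc) none

theorem mEv_nil (x : Int) : mEv [] x = none := rfl

theorem mEv_cons (l : Int × Int) (H : List (Int × Int)) (x : Int) :
    mEv (l :: H) x = minO (some (evalLine l x)) (mEv H x) := rfl

theorem mEv_append (A B : List (Int × Int)) (x : Int) :
    mEv (A ++ B) x = minO (mEv A x) (mEv B x) := by
  induction A with
  | nil => rfl
  | cons a t ih => simp [mEv_cons, ih, minO_assoc]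

theorem mEv_le_of_mem (H : List (Int × Int)) (x : Int) (w : Int × Int) (hw : w ∈ H) :
    ∃ v, mEv H x = some v ∧ v ≤ evalLine w x := by
  induction H with
  | nil => cases hw
  | cons a t ih =>
    rcases List.mem_cons.mp hw with rfl | hw'
    · cases hm : mEv t x with
      | none => exact ⟨evalLine w x, by simp [mEv_cons, hm, minO], le_refl _⟩
      | some u =>
        exact ⟨min (evalLine w x) u, by simp [mEv_cons, hm, minO], min_le_left _ _⟩
    · obtain ⟨v, hv, hle⟩ := ih hw'
      exact ⟨min (evalLine a x) v, by simp [mEv_cons, hv, minO],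
        le_trans (min_le_right _ _) hle⟩

theorem mEv_mem (H : List (Int × Int)) (x : Int) (v : Int) (hv : mEv H x = some v) :
    ∃ w ∈ H, evalLine w x = v := by
  induction H generalizing v with
  | nil => simp [mEv_nil] at hv
  | cons a t ih =>
    rw [mEv_cons] at hv
    cases hm : mEv t x with
    | none =>
      rw [hm] at hv
      simp only [minO] at hv
      exact ⟨a, by simp, by injection hv⟩
    | some u =>
      rw [hm] at hv
      simp only [minO] at hv
      have hv' : min (evalLine a x) u = v := by injection hv
      rcases min_cases (evalLine a x) u with ⟨he, _⟩ | ⟨he, _⟩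
      · exact ⟨a, by simp, by rw [← hv', he]⟩
      · obtain ⟨w, hw, he2⟩ := ih u hm
        exact ⟨w, by simp [hw], by rw [he2, ← hv', he]⟩

theorem mEv_ne_none (H : List (Int × Int)) (x : Int) (h : H ≠ []) : mEv H x ≠ none := by
  cases H with
  | nil => exact absurd rfl h
  | cons a t =>
    rw [mEv_cons]
    cases mEv t x <;> simp [minO]

-- ---------- B side: geometry of the hull ----------

theorem badLine_dominates (l1 l2 l3 : Int × Int) (h21 : l2.1 < l1.1) (h32 : l3.1 < l2.1)
    (hb : badLine l1 l2 l3 = true) (x : Int) :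
    min (evalLine l1 x) (evalLine l3 x) ≤ evalLine l2 x := by
  have hb' : (l3.2 - l2.2) * (l1.1 - l2.1) ≤ (l2.2 - l1.2) * (l2.1 - l3.1) := by
    simpa [badLine] using hb
  by_cases h1 : evalLine l1 x ≤ evalLine l2 x
  · exact le_trans (min_le_left _ _) h1
  · refine le_trans (min_le_right _ _) ?_
    unfold evalLine at *
    push Not at h1
    -- from l2 < l1 at x: (l1.1 - l2.1) * x > l2.2 - l1.2
    have hx : l2.2 - l1.2 < (l1.1 - l2.1) * x := by nlinarith
    -- multiply by l2.1 - l3.1 > 0 and divide by l1.1 - l2.1 > 0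
    have h2 : (l3.2 - l2.2) * (l1.1 - l2.1) < ((l1.1 - l2.1) * x) * (l2.1 - l3.1) := by
      nlinarith
    have h3 : l3.2 - l2.2 < x * (l2.1 - l3.1) := by
      have hpos : (0 : Int) < l1.1 - l2.1 := by omega
      nlinarith
    nlinarith

theorem notBad_step (l1 l2 l3 : Int × Int) (h21 : l2.1 < l1.1) (h32 : l3.1 < l2.1)
    (hb : badLine l1 l2 l3 = false) (x : Int)
    (hq : evalLine l1 x ≤ evalLine l2 x) : evalLine l2 x ≤ evalLine l3 x := by
  have hb' : (l2.2 - l1.2) * (l2.1 - l3.1) < (l3.2 - l2.2) * (l1.1 - l2.1) := by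
    have := hb
    unfold badLine at this
    simpa using this
  unfold evalLine at *
  have hx : (l1.1 - l2.1) * x ≤ l2.2 - l1.2 := by nlinarith
  have h2 : ((l1.1 - l2.1) * x) * (l2.1 - l3.1) < (l3.2 - l2.2) * (l1.1 - l2.1) := by
    nlinarith
  have hpos : (0 : Int) < l1.1 - l2.1 := by omega
  have h3 : x * (l2.1 - l3.1) < l3.2 - l2.2 := by nlinarith
  nlinarith

-- hull invariants, in index form (oldest line first; slopes strictly decreasing)
def HDecr (H : List (Int × Int)) : Prop :=
  ∀ t, t + 1 < H.length → (H.getD (t+1) (0, 0)).1 < (H.getD t (0, 0)).1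

def HConv (H : List (Int × Int)) : Prop :=
  ∀ t, t + 2 < H.length →
    badLine (H.getD t (0, 0)) (H.getD (t+1) (0, 0)) (H.getD (t+2) (0, 0)) = false

theorem getD_snoc (H : List (Int × Int)) (l : Int × Int) (t : Nat) :
    (H ++ [l]).getD t (0, 0) =
      if t < H.length then H.getD t (0, 0) else if t = H.length then l else (0, 0) := by
  rw [List.getD_eq_getElem?_getD, List.getElem?_append]
  by_cases h : t < H.length
  · rw [if_pos h, if_pos h, ← List.getD_eq_getElem?_getD]
  · rw [if_neg h, if_neg h]
    by_cases h2 : t = H.length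
    · subst h2
      simp
    · rw [if_neg h2]
      rw [List.getElem?_eq_none (by simp; omega)]
      rfl

theorem getD_mem (H : List (Int × Int)) (t : Nat) (h : t < H.length) :
    H.getD t (0, 0) ∈ H := by
  rw [List.getD_eq_getElem?_getD, List.getElem?_eq_getElem h]
  exact List.getElem_mem h

theorem getD_dropLast (H : List (Int × Int)) (t : Nat) (h : t < H.length - 1) :
    H.dropLast.getD t (0, 0) = H.getD t (0, 0) := by
  have h1 : t < H.dropLast.length := by simp [List.length_dropLast]; omega
  have h2 : t < H.length := by omega
  rw [List.getD_eq_getElem?_getD, List.getElem?_eq_getElem h1,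
      List.getD_eq_getElem?_getD, List.getElem?_eq_getElem h2]
  simp [List.getElem_dropLast]

theorem HDecr_snoc (H : List (Int × Int)) (l : Int × Int) (hd : HDecr H)
    (hs : ∀ p ∈ H, l.1 < p.1) : HDecr (H ++ [l]) := by
  intro t ht
  simp only [List.length_append, List.length_cons, List.length_nil] at ht
  rw [getD_snoc, getD_snoc]
  by_cases h1 : t + 1 < H.length
  · rw [if_pos h1, if_pos (by omega)]
    exact hd t h1
  · have ht1 : t + 1 = H.length := by omega
    rw [if_neg h1, if_pos ht1, if_pos (by omega)]
    exact hs _ (getD_mem H t (by omega))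

theorem insLine_spec_aux (l : Int × Int) :
    ∀ (n : Nat) (H : List (Int × Int)), H.length ≤ n →
      HDecr H → HConv H → (∀ p ∈ H, l.1 < p.1) →
      HDecr (insLine H l) ∧ HConv (insLine H l) ∧
      (∀ p ∈ insLine H l, p ∈ H ∨ p = l) ∧
      (∀ x, mEv (insLine H l) x = mEv (H ++ [l]) x) ∧ insLine H l ≠ [] := by
  intro n
  induction n with
  | zero =>
    intro H hlen hd hc hs
    have hH : H = [] := List.eq_nil_of_length_eq_zero (by omega)
    subst hH
    rw [insLine]
    rw [dif_neg (by simp)]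
    refine ⟨?_, ?_, by simp, fun x => rfl, by simp⟩
    · intro t ht; simp at ht
    · intro t ht; simp at ht
  | succ n ih =>
    intro H hlen hd hc hs
    rw [insLine]
    by_cases hcond : 2 ≤ H.length ∧
        badLine (H.getD (H.length - 2) (0, 0)) (H.getD (H.length - 1) (0, 0)) l = true
    · rw [dif_pos hcond]
      have hlen2 : 2 ≤ H.length := hcond.1
      have hd' : HDecr H.dropLast := by
        intro t ht
        simp only [List.length_dropLast] at ht
        rw [getD_dropLast H t (by omega), getD_dropLast H (t+1) (by omega)]
        exact hd t (by omega)
      have hc' : HConv H.dropLast := by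
        intro t ht
        simp only [List.length_dropLast] at ht
        rw [getD_dropLast H t (by omega), getD_dropLast H (t+1) (by omega),
            getD_dropLast H (t+2) (by omega)]
        exact hc t (by omega)
      have hs' : ∀ p ∈ H.dropLast, l.1 < p.1 := fun p hp =>
        hs p (List.Sublist.mem hp (List.dropLast_sublist H))
      have hres := ih H.dropLast (by simp [List.length_dropLast]; omega) hd' hc' hs'
      refine ⟨hres.1, hres.2.1, ?_, ?_, hres.2.2.2.2⟩
      · intro p hp
        rcases hres.2.2.1 p hp with h | h
        · exact Or.inl (List.Sublist.mem h (List.dropLast_sublist H))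
        · exact Or.inr h
      · intro x
        rw [hres.2.2.2.1 x]
        -- popping the covered last line does not change the pointwise minimum
        set w := H.getD (H.length - 2) (0, 0) with hw
        set u := H.getD (H.length - 1) (0, 0) with hu
        have hu1 : u.1 < w.1 := by
          have := hd (H.length - 2) (by omega)
          have he : H.length - 2 + 1 = H.length - 1 := by omega
          rw [he] at this
          exact this
        have hl1 : l.1 < u.1 := hs u (getD_mem H (H.length - 1) (by omega))
        have hdom := badLine_dominates w u l hu1 hl1 hcond.2 x
        have hwmem : w ∈ H.dropLast := by
          have : H.dropLast.getD (H.length - 2) (0, 0) = w := getD_dropLast H _ (by omega)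
          rw [← this]
          exact getD_mem H.dropLast (H.length - 2) (by simp [List.length_dropLast]; omega)
        obtain ⟨v, hv, hvw⟩ := mEv_le_of_mem H.dropLast x w hwmem
        have hHsplit : H.dropLast ++ [u] = H := by
          have hne : H ≠ [] := by intro h; rw [h] at hlen2; simp at hlen2
          have : H.getLast hne = u := by
            rw [hu, List.getLast_eq_getElem, List.getD_eq_getElem?_getD,
                List.getElem?_eq_getElem (by omega)]
            rfl
          rw [← this]
          exact List.dropLast_append_getLast hne
        calc mEv (H.dropLast ++ [l]) x
            = minO (mEv H.dropLast x) (some (evalLine l x)) := by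
              rw [mEv_append]; rfl
          _ = minO (minO (mEv H.dropLast x) (some (evalLine u x))) (some (evalLine l x)) := by
              rw [hv]
              simp only [minO]
              congr 1
              omega
          _ = minO (mEv (H.dropLast ++ [u]) x) (some (evalLine l x)) := by
              rw [mEv_append]; rfl
          _ = mEv (H ++ [l]) x := by rw [hHsplit, mEv_append]; rfl
    · rw [dif_neg hcond]
      refine ⟨HDecr_snoc H l hd hs, ?_, by intro p hp; simpa using hp, fun x => rfl, by simp⟩
      intro t ht
      simp only [List.length_append, List.length_cons, List.length_nil] at ht
      rw [getD_snoc, getD_snoc, getD_snoc]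
      by_cases h1 : t + 2 < H.length
      · rw [if_pos (by omega), if_pos (by omega), if_pos h1]
        exact hc t h1
      · have ht2 : t + 2 = H.length := by omega
        rw [if_pos (by omega), if_pos (by omega), if_neg (by omega), if_pos (by omega)]
        have hb : ¬ badLine (H.getD (H.length - 2) (0, 0)) (H.getD (H.length - 1) (0, 0)) l = true := by
          intro hb'
          exact hcond ⟨by omega, hb'⟩
        have he1 : H.length - 2 = t := by omega
        have he2 : H.length - 1 = t + 1 := by omega
        rw [he1, he2] at hb
        exact Bool.not_eq_true _ |>.mp hb

theorem insLine_spec (l : Int × Int) :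
    ∀ H, HDecr H → HConv H → (∀ p ∈ H, l.1 < p.1) →
      HDecr (insLine H l) ∧ HConv (insLine H l) ∧
      (∀ p ∈ insLine H l, p ∈ H ∨ p = l) ∧
      (∀ x, mEv (insLine H l) x = mEv (H ++ [l]) x) ∧ insLine H l ≠ [] := by
  intro H
  exact insLine_spec_aux l H.length H (le_refl _)

-- ---------- B side: the binary-search query returns the hull minimum ----------

-- evaluations strictly decrease before the valley …
theorem chain_down (f : Nat → Int) :
    ∀ (b a : Nat), a ≤ b → (∀ u, u < b → f (u+1) < f u) → f b ≤ f a := by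
  intro b
  induction b with
  | zero =>
    intro a ha _
    have : a = 0 := by omega
    rw [this]
  | succ b ihb =>
    intro a ha hlt
    by_cases hab : a = b + 1
    · rw [hab]
    · have h1 : f (b+1) < f b := hlt b (by omega)
      have h2 : f b ≤ f a := ihb a (by omega) (fun u hu => hlt u (by omega))
      omega

-- … and do not decrease after it
theorem chain_up (f : Nat → Int) (len : Nat) :
    ∀ (b a : Nat), a ≤ b → b < len → (∀ u, a ≤ u → u + 1 < len → f u ≤ f (u+1)) → f a ≤ f b := by
  intro b
  induction b with
  | zero => intro a ha _ _; have : a = 0 := by omega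
            rw [this]
  | succ b ihb =>
    intro a ha hblen hq
    by_cases hab : a = b + 1
    · rw [hab]
    · have h2 : f a ≤ f b := ihb a (by omega) (by omega) (fun u hu h2 => hq u hu (by omega))
      have h1 : f b ≤ f (b+1) := hq b (by omega) (by omega)
      omega

-- the keep-moving-right predicate is upward closed on a good hull
theorem Q_spread (H : List (Int × Int)) (x : Int) (hd : HDecr H) (hc : HConv H) (t : Nat)
    (hQ : evalLine (H.getD t (0,0)) x ≤ evalLine (H.getD (t+1) (0,0)) x) :
    ∀ u, t ≤ u → u + 1 < H.length →
      evalLine (H.getD u (0,0)) x ≤ evalLine (H.getD (u+1) (0,0)) x := by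
  intro u
  induction u with
  | zero => intro h1 _; have : t = 0 := by omega
            rw [this] at hQ; exact hQ
  | succ u ihu =>
    intro h1 h2
    by_cases htu : t = u + 1
    · rw [htu] at hQ; exact hQ
    · have hprev := ihu (by omega) (by omega)
      exact notBad_step _ _ _ (hd u (by omega)) (hd (u+1) (by omega)) (hc u (by omega)) x hprev

theorem queryBS_spec (H : List (Int × Int)) (x : Int) (hd : HDecr H) (hc : HConv H) :
    ∀ (c lo hi : Nat), hi - lo = c → lo ≤ hi → hi < H.length →
      (∀ u, u < lo → evalLine (H.getD (u+1) (0,0)) x < evalLine (H.getD u (0,0)) x) →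
      (∀ u, hi ≤ u → u + 1 < H.length →
        evalLine (H.getD u (0,0)) x ≤ evalLine (H.getD (u+1) (0,0)) x) →
      ∃ t0, t0 < H.length ∧ queryBS H x lo hi = evalLine (H.getD t0 (0,0)) x ∧
        ∀ u, u < H.length → evalLine (H.getD t0 (0,0)) x ≤ evalLine (H.getD u (0,0)) x := by
  intro c
  induction c using Nat.strong_induction_on with
  | _ c ihc =>
    intro lo hi hcc hlohi hhi hdown hup
    by_cases hlt : lo < hi
    · rw [queryBS, dif_pos hlt]
      set mid := (lo + hi) / 2 with hmid
      have hm1 : lo ≤ mid := by omega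
      have hm2 : mid < hi := by omega
      by_cases hQ : evalLine (H.getD mid (0,0)) x ≤ evalLine (H.getD (mid+1) (0,0)) x
      · rw [if_pos hQ]
        exact ihc (mid - lo) (by omega) lo mid rfl hm1 (by omega) hdown
          (fun u hu h2 => Q_spread H x hd hc mid hQ u hu h2)
      · rw [if_neg hQ]
        refine ihc (hi - (mid+1)) (by omega) (mid+1) hi rfl (by omega) hhi ?_ hup
        intro u hu
        by_cases hulo : u < lo
        · exact hdown u hulo
        · -- lo ≤ u ≤ mid : ¬Q there, else Q would spread to mid
          by_contra hge
          push Not at hge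
          have hQu : evalLine (H.getD u (0,0)) x ≤ evalLine (H.getD (u+1) (0,0)) x := hge
          have := Q_spread H x hd hc u hQu mid (by omega) (by omega)
          exact hQ this
    · have hlo : lo = hi := by omega
      rw [queryBS, dif_neg hlt]
      refine ⟨lo, by omega, rfl, ?_⟩
      intro u hu
      by_cases huu : u ≤ lo
      · exact chain_down (fun t => evalLine (H.getD t (0,0)) x) lo u huu
          (fun v hv => hdown v (by omega))
      · exact chain_up (fun t => evalLine (H.getD t (0,0)) x) H.length u lo (by omega) hu
          (fun v hv h2 => hup v (by omega) h2)

theorem queryBS_min (H : List (Int × Int)) (x : Int) (hd : HDecr H) (hc : HConv H)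
    (hne : H ≠ []) : mEv H x = some (queryBS H x 0 (H.length - 1)) := by
  have hlen : 1 ≤ H.length := by
    cases H with
    | nil => exact absurd rfl hne
    | cons a t => simp
  obtain ⟨t0, ht0, hq, hmin⟩ := queryBS_spec H x hd hc (H.length - 1) 0 (H.length - 1)
    rfl (by omega) (by omega) (by intro u hu; omega) (by intro u hu h2; omega)
  cases hm : mEv H x with
  | none => exact absurd hm (mEv_ne_none H x hne)
  | some v =>
    obtain ⟨w, hw, hwv⟩ := mEv_mem H x v hm
    obtain ⟨tw, htw, hwe⟩ := List.mem_iff_getElem.mp hw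
    have hgd : H.getD tw (0,0) = w := by
      rw [List.getD_eq_getElem?_getD, List.getElem?_eq_getElem htw, hwe]
      rfl
    have h1 : evalLine (H.getD t0 (0,0)) x ≤ v := by
      rw [← hwv, ← hgd]
      exact hmin tw htw
    obtain ⟨v', hv', hle'⟩ := mEv_le_of_mem H x (H.getD t0 (0,0)) (getD_mem H t0 ht0)
    rw [hm] at hv'
    have hvv : v = v' := by injection hv'
    have h2 : v ≤ evalLine (H.getD t0 (0,0)) x := by rw [hvv]; exact hle'
    rw [hq]
    congr 1
    omega

-- ---------- B side: a layer of lines computes L ----------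

def lineSet (used : List Int) (prev : List (Option Int)) (i : Nat) : List (Int × Int) :=
  (List.range i).filterMap (fun s => (prev.getD s none).map (fun p => lineOf used s p))

theorem eval_lineOf (used : List Int) (s i : Nat) (p : Int) :
    wprefA used i + evalLine (lineOf used s p) (prefA used i) = p + segA used s i := by
  simp only [evalLine, lineOf, segA]
  ring

-- minimum of a list of optional candidates (order-independent by ACI of minO)
def MO (l : List (Option Int)) : Option Int := l.foldl minO none

theorem foldl_minO_init : ∀ (l : List (Option Int)) (b : Option Int),
    l.foldl minO b = minO b (MO l) := by
  intro l
  induction l with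
  | nil => intro b; exact (minO_none_right b).symm
  | cons a t ih =>
    intro b
    show t.foldl minO (minO b a) = _
    rw [ih (minO b a), minO_assoc]
    show _ = minO b (t.foldl minO (minO none a))
    rw [ih (minO none a)]
    rfl

theorem MO_cons (a : Option Int) (t : List (Option Int)) : MO (a :: t) = minO a (MO t) := by
  show t.foldl minO (minO none a) = _
  rw [foldl_minO_init]
  rfl

theorem MO_snoc (l : List (Option Int)) (a : Option Int) : MO (l ++ [a]) = minO (MO l) a := by
  unfold MO
  rw [List.foldl_append]
  rfl

theorem MO_reverse (l : List (Option Int)) : MO l.reverse = MO l := by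
  induction l with
  | nil => rfl
  | cons a t ih =>
    rw [List.reverse_cons, MO_snoc, ih, MO_cons, minO_comm]

theorem map_add_minO (c : Int) (a b : Option Int) :
    Option.map (fun v => c + v) (minO a b) =
      minO (Option.map (fun v => c + v) a) (Option.map (fun v => c + v) b) := by
  cases a <;> cases b <;> simp [minO]

theorem L_eq_mEv (used : List Int) (j i : Nat) (prev : List (Option Int))
    (hprev : ∀ s, s < i → prev.getD s none = L used j s) :
    L used (j+1) i =
      Option.map (fun v => wprefA used i + v) (mEv (lineSet used prev i) (prefA used i)) := by
  have h1 : L used (j+1) i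
      = MO ((List.range i).map (fun k0 => addO (L used j (i - (k0+1))) (segA used (i - (k0+1)) i))) := by
    rw [L]
    unfold MO
    rw [List.foldl_map]
  rw [h1, ← MO_reverse, ← List.map_reverse, ← map_sub_range, List.map_map]
  have h2 : ∀ s ∈ List.range i,
      ((fun k0 => addO (L used j (i - (k0+1))) (segA used (i - (k0+1)) i)) ∘ (fun k0 => i - 1 - k0)) s
      = (fun s => addO (L used j s) (segA used s i)) s := by
    intro s hs
    have hsi : s < i := List.mem_range.mp hs
    simp only [Function.comp]
    have he : i - (i - 1 - s + 1) = s := by omega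
    rw [he]
  rw [List.map_congr_left h2]
  -- now induct over a generic list of starts
  unfold lineSet
  have main : ∀ (ls : List Nat), (∀ s ∈ ls, s < i) →
      MO (ls.map (fun s => addO (L used j s) (segA used s i)))
      = Option.map (fun v => wprefA used i + v)
          (mEv (ls.filterMap (fun s => (prev.getD s none).map (fun p => lineOf used s p))) (prefA used i)) := by
    intro ls
    induction ls with
    | nil => intro _; rfl
    | cons s t ih =>
      intro hmem
      have hsi : s < i := hmem s (by simp)
      have iht := ih (fun u hu => hmem u (by simp [hu]))
      simp only [List.map_cons]
      rw [MO_cons]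
      cases hp : prev.getD s none with
      | none =>
        have hL : L used j s = none := by rw [← hprev s hsi]; exact hp
        rw [hL]
        simp only [List.filterMap_cons, hp, Option.map_none]
        show minO none _ = _
        rw [iht]
        rfl
      | some p =>
        have hL : L used j s = some p := by rw [← hprev s hsi]; exact hp
        rw [hL]
        simp only [List.filterMap_cons, hp, Option.map_some]
        show minO (some (p + segA used s i)) _ = _
        rw [mEv_cons, map_add_minO, ← iht]
        have he : Option.map (fun v => wprefA used i + v)
            (some (evalLine (lineOf used s p) (prefA used i))) = some (p + segA used s i) := by
          simp only [Option.map_some]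
          rw [eval_lineOf]
        rw [he]
  exact main (List.range i) (fun s hs => List.mem_range.mp hs)

theorem getD_set_pv (l : List (Option Int)) (iN t : Nat) (v : Option Int) (hi : iN < l.length) :
    (l.set iN v).getD t none = if t = iN then v else l.getD t none := by
  by_cases h : t = iN
  · subst h
    rw [if_pos rfl, List.getD_eq_getElem?_getD, List.getElem?_set_self]
    · rfl
    · exact hi
  · rw [if_neg h, List.getD_eq_getElem?_getD, List.getElem?_set_ne (by omega),
        ← List.getD_eq_getElem?_getD]

theorem getD_replicate_none (k t : Nat) :
    (List.replicate k (none : Option Int)).getD t none = none := by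
  rw [List.getD_eq_getElem?_getD, List.getElem?_replicate]
  split_ifs <;> rfl

theorem lineSet_succ (used : List Int) (prev : List (Option Int)) (a : Nat) :
    lineSet used prev (a+1) = lineSet used prev a ++
      (match prev.getD a none with
       | none => []
       | some p => [lineOf used a p]) := by
  unfold lineSet
  rw [List.range_succ, List.filterMap_append]
  congr 1
  cases hp : prev.getD a none <;> rw [List.getD_eq_getElem?_getD] at hp <;> simp [hp]

theorem lineSet_nil_of (used : List Int) (prev : List (Option Int)) (k : Nat)
    (h : ∀ s, s < k → prev.getD s none = none) : lineSet used prev k = [] := by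
  unfold lineSet
  rw [List.filterMap_eq_nil_iff]
  intro s hs
  rw [h s (List.mem_range.mp hs)]
  rfl

-- the state invariant of B's banded layer sweep: a is the next endpoint to
-- process (so starts s < a-1 have been inserted and cells jj ≤ t < a written)
def LInv (used : List Int) (prev : List (Option Int)) (N j jj a : Nat)
    (st : List (Int × Int) × List (Option Int)) : Prop :=
  HDecr st.1 ∧ HConv st.1 ∧
  (∀ p ∈ st.1, ∃ s pv, s < a - 1 ∧ prev.getD s none = some pv ∧ p = lineOf used s pv) ∧
  (∀ x, mEv st.1 x = mEv (lineSet used prev (a - 1)) x) ∧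
  st.2.length = N + 1 ∧
  (∀ t, st.2.getD t none = if jj ≤ t ∧ t < a then L used (j+1) t else none)

theorem layerB_spec (used : List Int) (N M : Nat) (prev : List (Option Int)) (j : Nat)
    (hMN : M ≤ N) (hjM : j + 1 ≤ M)
    (hprev : ∀ t, prev.getD t none = if j ≤ t ∧ t ≤ N - M + j then L used j t else none) :
    ∀ t, (layerB used N M (j+1) prev).getD t none
      = if j + 1 ≤ t ∧ t ≤ N - M + (j+1) then L used (j+1) t else none := by
  have hprev' : ∀ s, s ≤ N - M + j → prev.getD s none = L used j s := by
    intro s hs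
    rw [hprev s]
    by_cases h1 : j ≤ s
    · rw [if_pos ⟨h1, hs⟩]
    · rw [if_neg (by omega), L_none used j s (by omega)]
  have step : ∀ (a : Nat), j + 1 ≤ a → a ≤ N - M + j + 1 → ∀ st, LInv used prev N j (j+1) a st →
      LInv used prev N j (j+1) (a+1)
        (let hull := match prev.getD (a - 1) none with
           | none => st.1
           | some p => insLine st.1 (lineOf used (a - 1) p)
         let cur := if hull.isEmpty then st.2
           else st.2.set a (some (wprefA used a + queryBS hull (prefA used a) 0 (hull.length - 1)))
         (hull, cur)) := by
    intro a haj haN st hinv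
    obtain ⟨hd, hc, hmem, hmev, hlen, hcur⟩ := hinv
    have hprevlt : ∀ s, s < a → prev.getD s none = L used j s := by
      intro s hs
      exact hprev' s (by omega)
    have hullprops : ∀ (hull : List (Int × Int)),
        hull = (match prev.getD (a - 1) none with
                | none => st.1
                | some p => insLine st.1 (lineOf used (a - 1) p)) →
        HDecr hull ∧ HConv hull ∧
        (∀ p ∈ hull, ∃ s pv, s < a ∧ prev.getD s none = some pv ∧ p = lineOf used s pv) ∧
        (∀ x, mEv hull x = mEv (lineSet used prev a) x) := by
      intro hull hh
      have hsucc : a - 1 + 1 = a := by omega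
      cases hpa : prev.getD (a - 1) none with
      | none =>
        rw [hpa] at hh
        subst hh
        refine ⟨hd, hc, ?_, ?_⟩
        · intro p hp
          obtain ⟨s, pv, hs, h1, h2⟩ := hmem p hp
          exact ⟨s, pv, by omega, h1, h2⟩
        · intro x
          rw [hmev x, ← hsucc, lineSet_succ, hpa]
          simp
      | some p =>
        rw [hpa] at hh
        subst hh
        have hslope : ∀ q ∈ st.1, (lineOf used (a - 1) p).1 < q.1 := by
          intro q hq
          obtain ⟨s, pv, hs, h1, h2⟩ := hmem q hq
          rw [h2]
          show -((a - 1 : Nat) : Int) < -(s : Int)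
          omega
        obtain ⟨hd', hc', hmem', hmev', hne'⟩ := insLine_spec (lineOf used (a - 1) p) st.1 hd hc hslope
        refine ⟨hd', hc', ?_, ?_⟩
        · intro q hq
          rcases hmem' q hq with h | h
          · obtain ⟨s, pv, hs, h1, h2⟩ := hmem q h
            exact ⟨s, pv, by omega, h1, h2⟩
          · exact ⟨a - 1, p, by omega, hpa, h⟩
        · intro x
          rw [hmev' x, mEv_append, hmev x, ← hsucc, lineSet_succ, hpa, mEv_append]
          simp only [Nat.add_sub_cancel]
    refine ⟨?_, ?_, ?_, ?_, ?_, ?_⟩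
    case _ => exact (hullprops _ rfl).1
    case _ => exact (hullprops _ rfl).2.1
    case _ =>
      intro p hp
      obtain ⟨s, pv, hs, h1, h2⟩ := (hullprops _ rfl).2.2.1 p hp
      exact ⟨s, pv, by omega, h1, h2⟩
    case _ =>
      intro x
      have := (hullprops _ rfl).2.2.2 x
      simpa [show a + 1 - 1 = a by omega] using this
    case _ =>
      show (if _ then st.2 else _).length = N + 1
      split_ifs
      · exact hlen
      · rw [List.length_set]; exact hlen
    case _ =>
      intro t
      set hull := (match prev.getD (a - 1) none with
                   | none => st.1
                   | some p => insLine st.1 (lineOf used (a - 1) p)) with hh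
      obtain ⟨hdh, hch, hmemh, hmevh⟩ := hullprops hull hh
      show (if hull.isEmpty then st.2 else _).getD t none = _
      by_cases hemp : hull.isEmpty
      · rw [if_pos hemp]
        have hullnil : hull = [] := List.isEmpty_iff.mp hemp
        have hLnone : L used (j+1) a = none := by
          rw [L_eq_mEv used j a prev hprevlt]
          rw [← hmevh (prefA used a), hullnil, mEv_nil]
          rfl
        rw [hcur t]
        by_cases h1 : j + 1 ≤ t ∧ t < a
        · rw [if_pos h1, if_pos (by omega)]
        · rw [if_neg h1]
          by_cases h2 : j + 1 ≤ t ∧ t < a + 1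
          · have : t = a := by omega
            rw [if_pos h2, this, hLnone]
          · rw [if_neg h2]
      · rw [if_neg hemp]
        have hullne : hull ≠ [] := by
          intro h
          rw [h] at hemp
          exact hemp rfl
        have hq := queryBS_min hull (prefA used a) hdh hch hullne
        have hLval : L used (j+1) a
            = some (wprefA used a + queryBS hull (prefA used a) 0 (hull.length - 1)) := by
          rw [L_eq_mEv used j a prev hprevlt, ← hmevh (prefA used a), hq]
          rfl
        rw [getD_set_pv st.2 a t _ (by rw [hlen]; omega)]
        by_cases ht : t = a
        · rw [if_pos ht, ht, if_pos (by omega), hLval]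
        · rw [if_neg ht, hcur t]
          by_cases h1 : j + 1 ≤ t ∧ t < a
          · rw [if_pos h1, if_pos (by omega)]
          · rw [if_neg h1, if_neg (by omega)]
  have main : ∀ (c a : Nat), j + 1 ≤ a → a + c = (j + 1) + (N - M + 1) → ∀ st,
      LInv used prev N j (j+1) a st →
      LInv used prev N j (j+1) (N - M + j + 2)
        ((List.range' a c).foldl
          (fun (st : List (Int × Int) × List (Option Int)) i =>
            let hull := match prev.getD (i - 1) none with
              | none => st.1
              | some p => insLine st.1 (lineOf used (i - 1) p)
            let cur := if hull.isEmpty then st.2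
              else st.2.set i (some (wprefA used i + queryBS hull (prefA used i) 0 (hull.length - 1)))
            (hull, cur)) st) := by
    intro c
    induction c with
    | zero =>
      intro a ha1 ha2 st hinv
      have : a = N - M + j + 2 := by omega
      subst this
      simpa using hinv
    | succ c ihc =>
      intro a ha1 ha2 st hinv
      have hrange : List.range' a (c+1) = a :: List.range' (a+1) c := by
        simp [List.range'_succ]
      rw [hrange, List.foldl_cons]
      exact ihc (a+1) (by omega) (by omega) _ (step a ha1 (by omega) st hinv)
  have hinv0 : LInv used prev N j (j+1) (j+1) ([], List.replicate (N+1) (none : Option Int)) := by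
    refine ⟨?_, ?_, ?_, ?_, by simp, ?_⟩
    · intro t ht; simp at ht
    · intro t ht; simp at ht
    · intro p hp; cases hp
    · intro x
      rw [lineSet_nil_of used prev (j + 1 - 1) ?hnil]
      case hnil =>
        intro s hs
        rw [hprev s, if_neg (by omega)]
    · intro t
      rw [getD_replicate_none]
      rw [if_neg (by omega)]
  have hfin := main (N - M + 1) (j+1) (le_refl _) (by omega) _ hinv0
  intro t
  unfold layerB
  rw [hfin.2.2.2.2.2 t]
  by_cases h1 : j + 1 ≤ t ∧ t < N - M + j + 2
  · rw [if_pos h1, if_pos (by omega)]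
  · rw [if_neg h1, if_neg (by omega)]

-- layer j of B's dp (buildB2 materialises exactly these rows)
def rowsB2 (used : List Int) (N M : Nat) : Nat → List (Option Int)
  | 0 => some 0 :: List.replicate N none
  | j+1 => layerB used N M (j+1) (rowsB2 used N M j)

theorem buildB2_eq (used : List Int) (N M : Nat) :
    buildB2 used N M = (List.range (M+1)).map (fun j => rowsB2 used N M j) := by
  unfold buildB2
  suffices h : ∀ (c a : Nat),
      ((List.range' a c).foldl (stepB2 used N M)
        (rowsB2 used N M a, (List.range (a+1)).map (fun j => rowsB2 used N M j)))
      = (rowsB2 used N M (a+c), (List.range (a+c+1)).map (fun j => rowsB2 used N M j)) by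
    have h0 := h M 0
    rw [show List.range M = List.range' 0 M by rw [List.range_eq_range']]
    have hr0 : rowsB2 used N M 0 = some 0 :: List.replicate N none := rfl
    have hm0 : (List.range (0+1)).map (fun j => rowsB2 used N M j) = [some 0 :: List.replicate N none] := by
      simp [List.range_succ, hr0]
    rw [← hm0, ← hr0, h0]
    simp
  intro c
  induction c with
  | zero => intro a; simp
  | succ c ihc =>
    intro a
    have hrange : List.range' a (c+1) = a :: List.range' (a+1) c := by
      simp [List.range'_succ]
    rw [hrange, List.foldl_cons]
    have hstep : stepB2 used N M
        (rowsB2 used N M a, (List.range (a+1)).map (fun j => rowsB2 used N M j)) a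
        = (rowsB2 used N M (a+1), (List.range (a+1+1)).map (fun j => rowsB2 used N M j)) := by
      show (layerB used N M (a+1) (rowsB2 used N M a), _) = _
      rw [show layerB used N M (a+1) (rowsB2 used N M a) = rowsB2 used N M (a+1) from rfl]
      rw [List.range_succ (n := a+1)]
      simp
    rw [hstep, ihc (a+1)]
    have harith : a + 1 + c = a + (c + 1) := by omega
    rw [harith]

theorem buildB2_getD (used : List Int) (N M j : Nat) (hj : j ≤ M) :
    (buildB2 used N M).getD j [] = rowsB2 used N M j := by
  rw [buildB2_eq]
  rw [List.getD_eq_getElem?_getD, List.getElem?_map, List.getElem?_range (by omega)]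
  rfl

theorem rowsB2_spec (used : List Int) (N M : Nat) (hMN : M ≤ N) :
    ∀ j, j ≤ M → ∀ t, (rowsB2 used N M j).getD t none
      = if j ≤ t ∧ t ≤ N - M + j then L used j t else none := by
  intro j
  induction j with
  | zero =>
    intro _ t
    rw [rowsB2]
    cases t with
    | zero => simp [L]
    | succ t' =>
      simp only [List.getD_cons_succ]
      rw [getD_replicate_none]
      by_cases h1 : 0 ≤ t' + 1 ∧ t' + 1 ≤ N - M + 0
      · rw [if_pos h1]
        simp [L]
      · rw [if_neg h1]
  | succ j ih =>
    intro hjM t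
    rw [rowsB2]
    exact layerB_spec used N M (rowsB2 used N M j) j hMN hjM (ih (by omega)) t

-- reading a banded row below the band limit gives exactly L
theorem rowsB2_read (used : List Int) (N M j i : Nat) (hMN : M ≤ N) (hjM : j ≤ M) :
    ∀ s, s < i → i ≤ N - M + j + 1 → (rowsB2 used N M j).getD s none = L used j s := by
  intro s hs hi
  rw [rowsB2_spec used N M hMN j hjM s]
  by_cases h1 : j ≤ s
  · rw [if_pos ⟨h1, by omega⟩]
  · rw [if_neg (by omega), L_none used j s (by omega)]

-- ---------- B side: reconstruction ----------

theorem findKB_eq (used : List Int) (prevL curL : List (Option Int)) (i j : Nat)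
    (hprev : ∀ s, s < i → prevL.getD s none = L used j s)
    (hcur : curL.getD i none = L used (j+1) i)
    (hfin : L used (j+1) i ≠ none) :
    findKB used prevL curL i = (chooseS used j i).map (fun s => i - s) := by
  unfold findKB chooseS
  have hc : (List.range i).find? (fun k0 =>
        match prevL.getD (i - (k0 + 1)) none with
        | none => false
        | some p => decide (curL.getD i none = some (p + segA used (i - (k0 + 1)) i)))
      = (List.range i).find? ((fun s =>
        decide (L used (j+1) i = addO (L used j s) (segA used s i))) ∘ (fun k0 => i - 1 - k0)) := by
    apply find?_congr_pv
    intro k0 hk0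
    have hk : k0 < i := List.mem_range.mp hk0
    have he : i - (k0+1) = i - 1 - k0 := by omega
    rw [hcur, hprev (i - (k0+1)) (by omega), he]
    simp only [Function.comp]
    cases hL : L used j (i - 1 - k0) with
    | none =>
      show false = _
      rw [show addO none (segA used (i-1-k0) i) = none from rfl]
      cases hLc : L used (j+1) i with
      | none => exact absurd hLc hfin
      | some v => simp
    | some p =>
      show decide _ = decide _
      rfl
  cases hfind : (List.range i).find? ((fun s =>
      decide (L used (j+1) i = addO (L used j s) (segA used s i))) ∘ (fun k0 => i - 1 - k0)) with
  | none =>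
    rw [hc, hfind]
    have : (List.range i).reverse.find? (fun s =>
        decide (L used (j+1) i = addO (L used j s) (segA used s i))) = none := by
      rw [← map_sub_range, List.find?_map, hfind]
      rfl
    rw [this]
    rfl
  | some k0 =>
    have hk : k0 < i := List.mem_range.mp (List.mem_of_find?_eq_some hfind)
    have h2 : (List.range i).reverse.find? (fun s =>
        decide (L used (j+1) i = addO (L used j s) (segA used s i))) = some (i - 1 - k0) := by
      rw [← map_sub_range, List.find?_map, hfind]
      rfl
    rw [hc, hfind, h2]
    simp only [Option.map_some]
    congr 1
    omega

theorem reconB2_spec (used : List Int) (N M : Nat) (hMN : M ≤ N) :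
    ∀ j i acc, j ≤ i → i ≤ N - M + j → j ≤ M → (1 ≤ j → L used j i ≠ none) →
      reconB2 used (buildB2 used N M) j i acc = acc ++ pathL used j i := by
  intro j
  induction j with
  | zero => intro i acc _ _ _ _; simp [reconB2, pathL]
  | succ j ih =>
    intro i acc hji hiband hjM hfin
    obtain ⟨v, hv⟩ := Option.ne_none_iff_exists'.mp (hfin (by omega))
    obtain ⟨s, hcs, hsi, hLeq, hLs, hjs⟩ := chooseS_spec used j i v hv
    have hg1 : (buildB2 used N M).getD j [] = rowsB2 used N M j := buildB2_getD used N M j (by omega)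
    have hg2 : (buildB2 used N M).getD (j+1) [] = rowsB2 used N M (j+1) := buildB2_getD used N M (j+1) hjM
    have hcurv : (rowsB2 used N M (j+1)).getD i none = L used (j+1) i := by
      rw [rowsB2_spec used N M hMN (j+1) hjM i, if_pos ⟨hji, by omega⟩]
    rw [reconB2]
    rw [hg1, hg2]
    rw [findKB_eq used (rowsB2 used N M j) (rowsB2 used N M (j+1)) i j
      (fun s' hs' => rowsB2_read used N M j i hMN (by omega) s' hs' (by omega)) hcurv
      (by rw [hv]; exact Option.some_ne_none v), hcs]
    simp only [Option.map_some]
    show reconB2 used (buildB2 used N M) j (i - (i - s)) (acc ++ [((i - s : Nat) : Int)]) = _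
    have hii : i - (i - s) = s := by omega
    rw [hii]
    rw [ih s _ (by omega) (by omega) (by omega) (fun _ => hLs)]
    rw [pathL, hcs]
    simp

-- ===== VERDICT (by name: the statement is the Claim_ definition above) =====
theorem solution_spec : Claim_equal_solution := by
  unfold Claim_equal_solution
  intro n m used hdom hpre
  unfold Spec_solution
  unfold Pre_solution at hpre
  by_cases h1 : m > n
  · unfold solution solution_alt
    rw [if_pos h1, if_pos (le_of_lt h1)]
  · by_cases h2 : m = n
    · unfold solution solution_alt
      rw [if_neg h1, if_pos h2, if_pos (by omega : n ≤ m)]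
      subst h2
      simp
    · have hlt : m < n := by omega
      have hm0 : 0 ≤ m ∧ n ≤ (used.length : Int) := by
        rcases hpre with h | h
        · omega
        · exact h
      unfold solution solution_alt
      rw [if_neg h1, if_neg h2, if_neg (by omega : ¬ n ≤ m)]
      have hMN : m.toNat < n.toNat := by omega
      have hT : ∀ i' j', i' ≤ n.toNat → j' ≤ m.toNat →
          getT (dpAL used n.toNat m.toNat) i' j' = L used j' i' := by
        intro i' j' hi hj
        rw [dpAL_eq used n.toNat m.toNat i' j']
        exact tblInv_read used m.toNat n.toNat (dpA used n.toNat m.toNat)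
          (dpA_spec used n.toNat m.toNat) i' j' hi hj
      have hfin : 1 ≤ m.toNat → L used m.toNat n.toNat ≠ none := fun h1M =>
        L_isSome used m.toNat n.toNat (by omega) (by omega)
      show PySem.Str.join " " ((reconA used (getT (dpAL used n.toNat m.toNat)) m.toNat n.toNat
          (List.replicate m.toNat 0)).map PySem.Int.toStr) = _
      rw [reconA_spec used n.toNat m.toNat (getT (dpAL used n.toNat m.toNat)) hT m.toNat n.toNat
        (List.replicate m.toNat 0) (by omega) (le_refl _) (le_refl _) hfin (by simp)]
      show _ = PySem.Str.join " " ((reconB2 used (buildB2 used n.toNat m.toNat) m.toNat n.toNat []).reverse.map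
        PySem.Int.toStr)
      rw [reconB2_spec used n.toNat m.toNat (by omega) m.toNat n.toNat [] (by omega) (by omega) (le_refl _) hfin]
      simp
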